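-- pv_equiv track=rewrite | github.com/IsaacG/Advent-of-Code | py/16.py | part1
-- ===== SOURCE A (Python) =====
-- def part1(data) -> int:
--   """Find bad fields."""
--   rule_by_name, your_ticket, nearby_tickets = data
--   # Bad fields are values that do not meet any rule.
--   bad_values = [
--     # Find all numbers on all tickets
--     number for ticket in nearby_tickets for number in ticket
--     if not any(
--       # Where number does not satify any part of any rule.
--       rule_part[0] <= number <= rule_part[1] for rule in rule_by_name.values() for rule_part in rule
--     )
--   ]
--   return sum(bad_values)
-- ===== SOURCE B (Python) =====
-- def part1(data) -> int:
--   """Find bad fields (sum of values matching no rule range).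
--
--   Alternative algorithm: flatten all rule parts, sort them by lower bound and
--   merge overlapping ranges ONCE, then test each ticket value against the short
--   sorted disjoint range list with early exit."""
--   rule_by_name, your_ticket, nearby_tickets = data
--   intervals = sorted(
--     (part for rule in rule_by_name.values() for part in rule),
--     key=lambda p: p[0],
--   )
--   merged = []
--   for lo, hi in intervals:
--     if merged and lo <= merged[-1][1]:
--       if hi > merged[-1][1]:
--         merged[-1] = (merged[-1][0], hi)
--     else:
--       merged.append((lo, hi))
--
--   def covered(n):
--     for lo, hi in merged:
--       if n < lo:
--         return False
--       if n <= hi: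
--         return True
--     return False
--
--   total = 0
--   for ticket in nearby_tickets:
--     for n in ticket:
--       if not covered(n):
--         total += n
--   return total
-- ===== Notes on version B (the rewrite author's own statement) =====
-- stated objective: faster
-- what changed: B flattens and sorts all rule ranges once, merges overlapping ranges into a sorted disjoint list, and tests each ticket value with an early-exit scan over that merged list, instead of A's per-value scan over every part of every rule.
import Mathlib
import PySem

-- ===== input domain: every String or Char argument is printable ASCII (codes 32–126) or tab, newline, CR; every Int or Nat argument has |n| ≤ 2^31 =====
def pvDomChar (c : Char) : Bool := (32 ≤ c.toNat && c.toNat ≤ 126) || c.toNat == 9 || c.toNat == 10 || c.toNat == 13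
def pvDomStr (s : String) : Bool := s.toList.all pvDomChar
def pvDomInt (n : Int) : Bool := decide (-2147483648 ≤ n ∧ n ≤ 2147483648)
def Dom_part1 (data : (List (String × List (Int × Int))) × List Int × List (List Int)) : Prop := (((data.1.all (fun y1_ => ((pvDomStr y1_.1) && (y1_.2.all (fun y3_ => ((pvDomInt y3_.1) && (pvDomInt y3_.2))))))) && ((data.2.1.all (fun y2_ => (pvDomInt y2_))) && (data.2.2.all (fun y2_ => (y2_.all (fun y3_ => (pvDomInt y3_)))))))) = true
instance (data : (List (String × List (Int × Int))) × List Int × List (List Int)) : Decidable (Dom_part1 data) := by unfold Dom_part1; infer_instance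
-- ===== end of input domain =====

-- B replaces A's per-number scan over every rule part by a sort-and-merge of the
-- rule ranges done once, followed by an early-exit scan of the merged disjoint
-- ranges per number (objective: faster by a constant factor on overlapping rules).

-- ===== PORT A =====
def part1 (data : (List (String × List (Int × Int))) × List Int × List (List Int)) : Int :=
  let rule_by_name := PySem.Dict.ofList data.1
  let nearby_tickets := data.2.2
  let bad_values := nearby_tickets.flatMap (fun ticket =>
    ticket.filter (fun number =>
      ! (rule_by_name.values.any (fun rule =>
          rule.any (fun rule_part => decide (rule_part.1 ≤ number) && decide (number ≤ rule_part.2))))))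
  bad_values.sum

-- ===== PORT B =====
-- the early-exit scan `covered` of Source B
def pvCovered (n : Int) : List (Int × Int) → Bool
  | [] => false
  | (lo, hi) :: rest => if n < lo then false else if n ≤ hi then true else pvCovered n rest

-- one step of Source B's merge loop (acc holds `merged` in reverse: head = merged[-1])
def pvMergeStep (acc : List (Int × Int)) (p : Int × Int) : List (Int × Int) :=
  match acc with
  | (a, b) :: rest => if p.1 ≤ b then (if b < p.2 then (a, p.2) :: rest else (a, b) :: rest) else p :: (a, b) :: rest
  | [] => [p]

def part1_alt (data : (List (String × List (Int × Int))) × List Int × List (List Int)) : Int :=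
  let rule_by_name := PySem.Dict.ofList data.1
  let nearby_tickets := data.2.2
  let intervals := PySem.List.sorted (rule_by_name.values.flatMap (fun rule => rule)) (fun p => p.1) false
  let merged := (intervals.foldl pvMergeStep []).reverse
  nearby_tickets.foldl (fun total ticket =>
    ticket.foldl (fun total n => if pvCovered n merged then total else total + n) total) 0

-- ===== PRECONDITION & SPEC =====
def Spec_part1 (data : (List (String × List (Int × Int))) × List Int × List (List Int)) (out : Int) : Prop := out = part1_alt data
instance (data : (List (String × List (Int × Int))) × List Int × List (List Int)) (out : Int) : Decidable (Spec_part1 data out) := by unfold Spec_part1; infer_instance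

-- ===== CLAIM (what is proved, stated in full; the proofs are below) =====
def Claim_equal_part1 : Prop := ∀ (data : (List (String × List (Int × Int))) × List Int × List (List Int)), Dom_part1 data → Spec_part1 data (part1 data)

-- ===== LEMMAS AND PROOFS =====

-- "some range of l contains x"
def pvCovers (l : List (Int × Int)) (x : Int) : Prop := ∃ p ∈ l, p.1 ≤ x ∧ x ≤ p.2

theorem pvCovers_perm {l l' : List (Int × Int)} (h : l.Perm l') (x : Int) :
    pvCovers l x ↔ pvCovers l' x := by
  unfold pvCovers
  constructor <;> rintro ⟨p, hp, hx⟩ <;> exact ⟨p, by first | exact h.mem_iff.1 hp | exact h.mem_iff.2 hp, hx⟩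

-- the merge fold preserves coverage and keeps acc sorted descending by lower bound
theorem pvMerge_inv (x : Int) :
    ∀ (l acc : List (Int × Int)),
      l.Pairwise (fun p q => p.1 ≤ q.1) →
      (∀ a b, acc.head? = some (a, b) → ∀ q ∈ l, a ≤ q.1) →
      acc.Pairwise (fun p q => q.1 ≤ p.1) →
      ((pvCovers (l.foldl pvMergeStep acc) x ↔ pvCovers acc x ∨ pvCovers l x) ∧
        (l.foldl pvMergeStep acc).Pairwise (fun p q => q.1 ≤ p.1)) := by
  intro l
  induction l with
  | nil =>
    intro acc _ _ hacc
    simpa [pvCovers] using hacc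
  | cons p t ih =>
    obtain ⟨plo, phi⟩ := p
    rintro acc hsorted hhead hacc
    rw [List.pairwise_cons] at hsorted
    obtain ⟨hp_le, ht_sorted⟩ := hsorted
    simp only [List.foldl_cons]
    have main :
        (pvCovers (pvMergeStep acc (plo, phi)) x ↔ pvCovers acc x ∨ (plo ≤ x ∧ x ≤ phi)) ∧
        (∀ a b, (pvMergeStep acc (plo, phi)).head? = some (a, b) → ∀ q ∈ t, a ≤ q.1) ∧
        (pvMergeStep acc (plo, phi)).Pairwise (fun p q => q.1 ≤ p.1) := by
      match hA : acc with
      | [] =>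
        refine ⟨?_, ?_, ?_⟩
        · simp only [pvMergeStep, pvCovers]
          constructor
          · rintro ⟨q, hq, hx⟩
            rcases List.mem_singleton.1 hq with hq
            subst hq
            exact Or.inr ⟨hx.1, hx.2⟩
          · rintro (⟨q, hq, _⟩ | hx)
            · cases hq
            · exact ⟨(plo, phi), List.mem_singleton_self _, hx⟩
        · intro a b h q hq
          simp only [pvMergeStep, List.head?_cons, Option.some.injEq, Prod.mk.injEq] at h
          rw [← h.1]
          exact hp_le q hq
        · simp [pvMergeStep]
      | (a, b) :: rest =>
        have ha_le_p : a ≤ plo := hhead a b rfl (plo, phi) List.mem_cons_self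
        have hrest_le : ∀ r ∈ rest, r.1 ≤ a := fun r hr => (List.pairwise_cons.1 hacc).1 r hr
        by_cases h1 : plo ≤ b
        · by_cases h2 : b < phi
          · -- extend last interval to (a, phi)
            simp only [pvMergeStep, if_pos h1, if_pos h2]
            refine ⟨?_, ?_, ?_⟩
            · constructor
              · rintro ⟨q, hq, hx⟩
                rcases List.mem_cons.1 hq with hq | hq
                · subst hq
                  by_cases hxb : x ≤ b
                  · exact Or.inl ⟨(a, b), List.mem_cons_self, hx.1, hxb⟩
                  · exact Or.inr ⟨by omega, hx.2⟩
                · exact Or.inl ⟨q, List.mem_cons_of_mem _ hq, hx⟩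
              · rintro (⟨q, hq, hx⟩ | hx)
                · rcases List.mem_cons.1 hq with hq | hq
                  · subst hq; exact ⟨(a, phi), List.mem_cons_self, hx.1, by omega⟩
                  · exact ⟨q, List.mem_cons_of_mem _ hq, hx⟩
                · exact ⟨(a, phi), List.mem_cons_self, by omega, hx.2⟩
            · intro a' b' h' q hq
              simp only [List.head?_cons, Option.some.injEq, Prod.mk.injEq] at h'
              rw [← h'.1]
              exact le_trans ha_le_p (hp_le q hq)
            · rw [List.pairwise_cons]
              exact ⟨hrest_le, (List.pairwise_cons.1 hacc).2⟩
          · -- keep acc unchanged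
            simp only [pvMergeStep, if_pos h1, if_neg h2]
            refine ⟨?_, ?_, ?_⟩
            · constructor
              · exact fun h => Or.inl h
              · rintro (h | hx)
                · exact h
                · exact ⟨(a, b), List.mem_cons_self, by omega, by omega⟩
            · intro a' b' h' q hq
              simp only [List.head?_cons, Option.some.injEq, Prod.mk.injEq] at h'
              rw [← h'.1]; exact le_trans ha_le_p (hp_le q hq)
            · exact hacc
        · -- start a new interval
          simp only [pvMergeStep, if_neg h1]
          refine ⟨?_, ?_, ?_⟩
          · constructor
            · rintro ⟨q, hq, hx⟩
              rcases List.mem_cons.1 hq with hq | hq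
              · subst hq; exact Or.inr hx
              · exact Or.inl ⟨q, hq, hx⟩
            · rintro (⟨q, hq, hx⟩ | hx)
              · exact ⟨q, List.mem_cons_of_mem _ hq, hx⟩
              · exact ⟨(plo, phi), List.mem_cons_self, hx⟩
          · intro a' b' h' q hq
            simp only [List.head?_cons, Option.some.injEq, Prod.mk.injEq] at h'
            rw [← h'.1]; exact hp_le q hq
          · rw [List.pairwise_cons]
            refine ⟨?_, hacc⟩
            intro r hr
            rcases List.mem_cons.1 hr with hr | hr
            · subst hr; exact ha_le_p
            · exact le_trans (hrest_le r hr) ha_le_p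
    obtain ⟨hcov, hhd, hpw⟩ := main
    obtain ⟨ihcov, ihpw⟩ := ih (pvMergeStep acc (plo, phi)) ht_sorted hhd hpw
    refine ⟨?_, ihpw⟩
    rw [ihcov, hcov]
    unfold pvCovers
    constructor
    · rintro ((h | h) | h)
      · exact Or.inl h
      · exact Or.inr ⟨(plo, phi), List.mem_cons_self, h⟩
      · rcases h with ⟨q, hq, hx⟩
        exact Or.inr ⟨q, List.mem_cons_of_mem _ hq, hx⟩
    · rintro (h | ⟨q, hq, hx⟩)
      · exact Or.inl (Or.inl h)
      · rcases List.mem_cons.1 hq with hq | hq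
        · subst hq; exact Or.inl (Or.inr hx)
        · exact Or.inr ⟨q, hq, hx⟩

-- the early-exit scan decides coverage on a list sorted ascending by lower bound
theorem pvCovered_iff (x : Int) :
    ∀ l : List (Int × Int), l.Pairwise (fun p q => p.1 ≤ q.1) →
      (pvCovered x l = true ↔ pvCovers l x) := by
  intro l
  induction l with
  | nil => simp [pvCovered, pvCovers]
  | cons p t ih =>
    intro hs
    rw [List.pairwise_cons] at hs
    obtain ⟨hle, hts⟩ := hs
    obtain ⟨lo, hi⟩ := p
    simp only [pvCovered]
    by_cases hxlo : x < lo
    · simp only [if_pos hxlo]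
      constructor
      · intro h; cases h
      · rintro ⟨q, hq, hx⟩
        rcases List.mem_cons.1 hq with hq | hq
        · subst hq; omega
        · have := hle q hq; simp at this; omega
    · simp only [if_neg hxlo]
      by_cases hxhi : x ≤ hi
      · simp only [if_pos hxhi]
        constructor
        · intro _; exact ⟨(lo, hi), List.mem_cons_self, by omega, hxhi⟩
        · intro _; trivial
      · simp only [if_neg hxhi]
        rw [ih hts]
        unfold pvCovers
        constructor
        · rintro ⟨q, hq, hx⟩; exact ⟨q, List.mem_cons_of_mem _ hq, hx⟩
        · rintro ⟨q, hq, hx⟩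
          rcases List.mem_cons.1 hq with hq | hq
          · subst hq; simp at hx; omega
          · exact ⟨q, hq, hx⟩

-- A's rule check is coverage by the flattened rule-part list
theorem pvAny_iff_covers (rules : List (List (Int × Int))) (n : Int) :
    (rules.any (fun rule => rule.any (fun rp => decide (rp.1 ≤ n) && decide (n ≤ rp.2))) = true)
      ↔ pvCovers (rules.flatMap (fun rule => rule)) n := by
  unfold pvCovers
  constructor
  · intro h
    rcases List.any_eq_true.1 h with ⟨r, hr, h2⟩
    rcases List.any_eq_true.1 h2 with ⟨q, hq, h3⟩
    simp only [Bool.and_eq_true, decide_eq_true_eq] at h3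
    exact ⟨q, List.mem_flatMap.2 ⟨r, hr, hq⟩, h3⟩
  · rintro ⟨q, hq, hx⟩
    rcases List.mem_flatMap.1 hq with ⟨r, hr, hqr⟩
    exact List.any_eq_true.2 ⟨r, hr, List.any_eq_true.2 ⟨q, hqr, by simp [hx.1, hx.2]⟩⟩

-- B's nested accumulation equals A's sum-of-filtered-comprehension shape
theorem pvFold_eq_sum (c : Int → Bool) :
    ∀ (nearby : List (List Int)) (init : Int),
      nearby.foldl (fun total ticket =>
        ticket.foldl (fun total n => if c n then total else total + n) total) init
        = init + (nearby.flatMap (fun t => t.filter (fun n => !c n))).sum := by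
  have inner : ∀ (t : List Int) (acc : Int),
      t.foldl (fun total n => if c n then total else total + n) acc
        = acc + (t.filter (fun n => !c n)).sum := by
    intro t
    induction t with
    | nil => simp
    | cons n t ih =>
      intro acc
      simp only [List.foldl_cons, List.filter_cons]
      by_cases h : c n
      · simp [h, ih]
      · simp [h, ih]; omega
  intro nearby
  induction nearby with
  | nil => simp
  | cons t rest ih =>
    intro init
    simp only [List.foldl_cons, List.flatMap_cons, List.sum_append]
    rw [inner, ih]
    omega

-- pointwise: B's covered test agrees with A's any-rule test
theorem pvCovered_eq_any (rules : List (List (Int × Int))) (n : Int) :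
    pvCovered n ((((PySem.List.sorted (rules.flatMap (fun rule => rule)) (fun p => p.1) false)).foldl pvMergeStep []).reverse)
      = rules.any (fun rule => rule.any (fun rp => decide (rp.1 ≤ n) && decide (n ≤ rp.2))) := by
  set ivs := PySem.List.sorted (rules.flatMap (fun rule => rule)) (fun p => p.1) false with hivs
  have hsorted : ivs.Pairwise (fun p q => p.1 ≤ q.1) := PySem.List.sorted_pairwise _ _
  have hperm : ivs.Perm (rules.flatMap (fun rule => rule)) := PySem.List.sorted_perm _ _ _
  obtain ⟨hcov, hpw⟩ := pvMerge_inv n ivs [] hsorted (by intro a b h; cases h) (by simp)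
  have hpw' : (ivs.foldl pvMergeStep []).reverse.Pairwise (fun p q => p.1 ≤ q.1) := by
    rw [List.pairwise_reverse]; exact hpw
  have hcov' : pvCovers ((ivs.foldl pvMergeStep []).reverse) n ↔ pvCovers ivs n := by
    rw [pvCovers_perm (List.reverse_perm _) n, hcov]
    simp [pvCovers]
  by_cases h : pvCovers ivs n
  · have hb : pvCovered n ((ivs.foldl pvMergeStep []).reverse) = true :=
      (pvCovered_iff n _ hpw').2 (hcov'.2 h)
    rw [hb]
    exact ((pvAny_iff_covers rules n).2 ((pvCovers_perm hperm n).1 h)).symm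
  · have hb : pvCovered n ((ivs.foldl pvMergeStep []).reverse) = false := by
      rcases Bool.eq_false_or_eq_true (pvCovered n ((ivs.foldl pvMergeStep []).reverse)) with ht | hf
      · exact absurd (hcov'.1 ((pvCovered_iff n _ hpw').1 ht)) h
      · exact hf
    rw [hb]
    rcases Bool.eq_false_or_eq_true (rules.any (fun rule => rule.any (fun rp => decide (rp.1 ≤ n) && decide (n ≤ rp.2)))) with ht | hf
    · exact absurd ((pvCovers_perm hperm n).2 ((pvAny_iff_covers rules n).1 ht)) h
    · exact hf.symm

-- ===== VERDICT (by name: the statement is the Claim_ definition above) =====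
theorem part1_spec : Claim_equal_part1 := by
  intro data _
  unfold Spec_part1
  simp only [part1, part1_alt]
  rw [pvFold_eq_sum, zero_add]
  simp only [pvCovered_eq_any]
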